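-- pv_equiv track=rewrite | github.com/ajs/tools | puzzles/perlweeklychallenge/rare_num.py | rare_second_digits
-- ===== SOURCE A (Python) =====
-- def rare_second_digits(first, last):
--     """
--     Given the first and last digits, return tuples of all possible
--     second, second-from-last digits in a rare number
--     """
--
--     if first == 2 or (first == 8 and last == 8):
--         for n in range(10):
--             yield (n, n)
--     elif first == 4:
--         for a in range(0, 10):
--             for b in range((0 if a % 2 == 0 else 1), 10, 2):
--                 yield (a, b)
--     elif first == 6:
--         for a in range(0, 10):
--             for b in range((1 if a % 2 == 0 else 0), 10, 2):
--                 yield (a, b)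
--     elif first == 8:
--         if last == 2 or last == 8:
--             for a in range(0, 10):
--                 yield (a, 9-a)
--         elif last == 3:
--             for a in range (0, 10):
--                 if a > 6:
--                     yield (a, a-7)
--                 else:
--                     yield (a, a+3)
--         elif last == 7:
--             for a in range(0, 10):
--                 if a > 1:
--                     yield (a, 11-a)
--                 else:
--                     yield (a, 1-a)
-- ===== SOURCE B (Python) =====
-- def rare_second_digits(first, last):
--     """Generate-and-filter: pick one predicate over (a, b), then scan the full 10x10 grid."""
--     if first == 2 or (first == 8 and last == 8):
--         pred = lambda a, b: a == b
--     elif first == 4: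
--         pred = lambda a, b: (a - b) % 2 == 0
--     elif first == 6:
--         pred = lambda a, b: (a - b) % 2 == 1
--     elif first == 8 and last == 2:
--         pred = lambda a, b: a + b == 9
--     elif first == 8 and last == 3:
--         pred = lambda a, b: b == (a + 3) % 10
--     elif first == 8 and last == 7:
--         pred = lambda a, b: b == (1 - a) % 10
--     else:
--         pred = lambda a, b: False
--     for a in range(10):
--         for b in range(10):
--             if pred(a, b):
--                 yield (a, b)
-- ===== Notes on version B (the rewrite author's own statement) =====
-- stated objective: simpler
-- what changed: Replaced A's six hand-crafted per-branch loop constructions (custom range steps, off-by-one wraparound conditionals) by a uniform generate-and-filter: one boolean predicate is selected from first/last, then the full 10x10 grid is scanned and pairs satisfying the predicate are yielded; the modular forms (a+3)%10 and (1-a)%10 subsume A's explicit wraparound branches.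
import Mathlib
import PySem

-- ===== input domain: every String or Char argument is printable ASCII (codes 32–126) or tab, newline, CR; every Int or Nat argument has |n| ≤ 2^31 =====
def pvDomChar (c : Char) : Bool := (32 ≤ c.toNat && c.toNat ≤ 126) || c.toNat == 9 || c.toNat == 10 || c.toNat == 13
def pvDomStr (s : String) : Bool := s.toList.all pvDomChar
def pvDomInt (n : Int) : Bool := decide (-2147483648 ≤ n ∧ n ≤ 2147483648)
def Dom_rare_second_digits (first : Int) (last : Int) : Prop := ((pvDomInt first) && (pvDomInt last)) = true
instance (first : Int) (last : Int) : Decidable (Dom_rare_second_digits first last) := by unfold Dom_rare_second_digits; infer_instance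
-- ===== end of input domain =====

-- B replaces A's per-branch custom loops by selecting one predicate and filtering the full 10x10 grid (objective: simpler).

-- ===== PORT A =====
-- literal transliteration of A: each yield-loop becomes a map/foldl over the same range
def rare_second_digits (first : Int) (last : Int) : List (Int × Int) :=
  if first = 2 ∨ (first = 8 ∧ last = 8) then
    (PySem.List.pyRange 0 10 1).map (fun n => (n, n))
  else if first = 4 then
    (PySem.List.pyRange 0 10 1).foldl (fun acc a =>
      acc ++ ((PySem.List.pyRange (if PySem.Int.mod a 2 = 0 then 0 else 1) 10 2).map (fun b => (a, b)))) []
  else if first = 6 then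
    (PySem.List.pyRange 0 10 1).foldl (fun acc a =>
      acc ++ ((PySem.List.pyRange (if PySem.Int.mod a 2 = 0 then 1 else 0) 10 2).map (fun b => (a, b)))) []
  else if first = 8 then
    if last = 2 ∨ last = 8 then
      (PySem.List.pyRange 0 10 1).map (fun a => (a, 9 - a))
    else if last = 3 then
      (PySem.List.pyRange 0 10 1).map (fun a => if a > 6 then (a, a - 7) else (a, a + 3))
    else if last = 7 then
      (PySem.List.pyRange 0 10 1).map (fun a => if a > 1 then (a, 11 - a) else (a, 1 - a))
    else []
  else []

-- ===== PORT B =====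
-- literal transliteration of Source B: pick a predicate, then scan the full grid and keep matching pairs
def rare_second_digits_alt (first : Int) (last : Int) : List (Int × Int) :=
  let pred : Int → Int → Bool :=
    if first = 2 ∨ (first = 8 ∧ last = 8) then fun a b => a == b
    else if first = 4 then fun a b => PySem.Int.mod (a - b) 2 == 0
    else if first = 6 then fun a b => PySem.Int.mod (a - b) 2 == 1
    else if first = 8 ∧ last = 2 then fun a b => a + b == 9
    else if first = 8 ∧ last = 3 then fun a b => b == PySem.Int.mod (a + 3) 10
    else if first = 8 ∧ last = 7 then fun a b => b == PySem.Int.mod (1 - a) 10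
    else fun _ _ => false
  (PySem.List.pyRange 0 10 1).foldl (fun acc a =>
    (PySem.List.pyRange 0 10 1).foldl (fun acc2 b =>
      if pred a b then acc2 ++ [(a, b)] else acc2) acc) []

-- ===== PRECONDITION & SPEC =====
def Spec_rare_second_digits (first : Int) (last : Int) (out : List (Int × Int)) : Prop := out = rare_second_digits_alt first last
instance (first : Int) (last : Int) (out : List (Int × Int)) : Decidable (Spec_rare_second_digits first last out) := by unfold Spec_rare_second_digits; infer_instance

-- ===== CLAIM (what is proved, stated in full; the proofs are below) =====
def Claim_equal_rare_second_digits : Prop := ∀ (first : Int) (last : Int), Dom_rare_second_digits first last → Spec_rare_second_digits first last (rare_second_digits first last)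

-- ===== LEMMAS AND PROOFS =====

-- ===== VERDICT (by name: the statement is the Claim_ definition above) =====
theorem rare_second_digits_spec : Claim_equal_rare_second_digits := by
  intro first last _
  unfold Spec_rare_second_digits rare_second_digits rare_second_digits_alt
  by_cases h2 : first = 2
  · subst h2; simp; decide
  · by_cases h4 : first = 4
    · subst h4; simp; decide
    · by_cases h6 : first = 6
      · subst h6; simp; decide
      · by_cases h8 : first = 8
        · subst h8
          by_cases l8 : last = 8
          · subst l8; simp; decide
          · by_cases l2 : last = 2
            · subst l2; simp; decide
            · by_cases l3 : last = 3
              · subst l3; simp; decide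
              · by_cases l7 : last = 7
                · subst l7; simp; decide
                · simp [l2, l3, l7, l8]
        · simp [h2, h4, h6, h8]
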